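-- pv_equiv track=rewrite | github.com/MarkusEnglberger/Corr2Cause_PP | scripts/create_c2cp.py | build_premise
-- ===== SOURCE A (Python) =====
-- from collections import defaultdict
--
-- def node_to_name(i, letter_map=None):
--     """Convert node index to variable name.
--
--     If letter_map is provided, use it. Otherwise default to Z, Y, X, ...
--     """
--     if letter_map:
--         return letter_map[i]
--     return chr(91 - i)
--
-- def list_to_text(items):
--     """Convert list to natural language (e.g., ['A', 'B', 'C'] -> 'A, B, and C')."""
--     if len(items) == 0:
--         return ""
--     if len(items) == 1:
--         return items[0]
--     if len(items) == 2:
--         return f"{items[0]} and {items[1]}"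
--     return ", ".join(items[:-1]) + ", and " + items[-1]
--
-- def build_premise(ci_relations, n, letter_map=None):
--     """Build the premise text from CI relations using mathematical notation."""
--     # Build mapping from node pairs to their conditioning sets
--     pair_to_conds = defaultdict(list)
--     for pair, cond in ci_relations:
--         pair_to_conds[tuple(pair)].append(cond)
--
--     # Sort by conditioning set size
--     pair_to_conds = {k: sorted(v, key=len) for k, v in pair_to_conds.items()}
--
--     # Build premise
--     var_names = [node_to_name(i, letter_map) for i in range(1, n + 1)]
--     premise = f"Suppose there is a closed system of {n} variables, {list_to_text(var_names)}, whose causal structure forms a directed acyclic graph and satisfies faithfulness. "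
--     premise += f"All the conditional independence relations are: "
--
--     # Build CI statements in mathematical notation: X indep Y | Z
--     ci_statements = []
--     for pair, conds in sorted(pair_to_conds.items()):
--         i, j = pair
--         ni, nj = node_to_name(i, letter_map), node_to_name(j, letter_map)
--         for cond in conds:
--             if cond:
--                 cond_names = ", ".join(node_to_name(c, letter_map) for c in cond)
--                 ci_statements.append(f"{ni} indep {nj} | {cond_names}")
--             else:
--                 ci_statements.append(f"{ni} indep {nj}")
--
--     premise += "; ".join(ci_statements) + "."
--
--     return premise
-- ===== SOURCE B (Python) =====
-- def node_to_name(i, letter_map=None):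
--     """Convert node index to variable name.
--
--     If letter_map is provided, use it. Otherwise default to Z, Y, X, ...
--     """
--     if letter_map:
--         return letter_map[i]
--     return chr(91 - i)
--
--
-- def list_to_text(items):
--     """Convert list to natural language (e.g., ['A', 'B', 'C'] -> 'A, B, and C')."""
--     if len(items) == 0:
--         return ""
--     if len(items) == 1:
--         return items[0]
--     if len(items) == 2:
--         return f"{items[0]} and {items[1]}"
--     return ", ".join(items[:-1]) + ", and " + items[-1]
--
--
-- def build_premise(ci_relations, n, letter_map=None):
--     """Build the premise text from CI relations using mathematical notation."""
--     var_names = [node_to_name(i, letter_map) for i in range(1, n + 1)]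
--     premise = f"Suppose there is a closed system of {n} variables, {list_to_text(var_names)}, whose causal structure forms a directed acyclic graph and satisfies faithfulness. "
--     premise += f"All the conditional independence relations are: "
--
--     # One stable sort of the flat relation list replaces A's grouping dict,
--     # its per-group sorts and the sort of the grouped items.
--     ci_statements = []
--     for pair, cond in sorted(ci_relations, key=lambda r: (tuple(r[0]), len(r[1]))):
--         i, j = pair
--         ni, nj = node_to_name(i, letter_map), node_to_name(j, letter_map)
--         if cond:
--             cond_names = ", ".join(node_to_name(c, letter_map) for c in cond)
--             ci_statements.append(f"{ni} indep {nj} | {cond_names}")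
--         else:
--             ci_statements.append(f"{ni} indep {nj}")
--
--     premise += "; ".join(ci_statements) + "."
--
--     return premise
-- ===== Notes on version B (the rewrite author's own statement) =====
-- stated objective: simpler
-- what changed: Replaces A's three-stage pipeline (group relations into a defaultdict keyed by tuple(pair), sort each group by conditioning-set size, then sort the grouped items) by one stable sort of the flat ci_relations list with key (tuple(pair), len(cond)) followed by a single formatting pass. Pre_ additionally excludes indices whose default name chr(91-i) is a lone surrogate: both Pythons return identically there, but that string is not representable as a Lean String.
import Mathlib
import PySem

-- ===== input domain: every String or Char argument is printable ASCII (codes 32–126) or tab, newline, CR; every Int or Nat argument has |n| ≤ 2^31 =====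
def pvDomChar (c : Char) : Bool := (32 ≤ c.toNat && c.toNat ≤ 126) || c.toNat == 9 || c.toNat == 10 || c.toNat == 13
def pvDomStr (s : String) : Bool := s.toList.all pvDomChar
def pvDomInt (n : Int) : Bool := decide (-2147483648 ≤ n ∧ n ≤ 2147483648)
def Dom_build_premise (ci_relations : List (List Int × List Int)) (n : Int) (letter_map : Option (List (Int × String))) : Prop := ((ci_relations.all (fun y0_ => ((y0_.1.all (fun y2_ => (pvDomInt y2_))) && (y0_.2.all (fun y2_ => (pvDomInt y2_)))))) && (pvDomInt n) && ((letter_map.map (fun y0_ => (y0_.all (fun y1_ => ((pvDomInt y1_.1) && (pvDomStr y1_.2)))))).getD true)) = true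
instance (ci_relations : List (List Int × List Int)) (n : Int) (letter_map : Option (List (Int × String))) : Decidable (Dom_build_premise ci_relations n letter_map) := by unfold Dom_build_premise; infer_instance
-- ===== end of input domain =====

-- ===== PORT A =====
-- B changes the premise construction from group-dict + per-group sorts + item sort to a single
-- stable flat sort; objective: simpler.  Helpers node_to_name / list_to_text are module helpers
-- shared by both Pythons, so both ports share their transliterations below.

-- chr(91 - i); exact under Pre_ (which requires 91 - i to be a valid non-surrogate code point)
def chrStr (code : Int) : String := String.ofList [Char.ofNat code.toNat]

-- node_to_name(i, letter_map); the dict lookup letter_map[i] (KeyError excluded by Pre_)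
def nodeName (i : Int) (lm : Option (List (Int × String))) : String :=
  match lm with
  | some m => if m ≠ [] then (m.lookup i).getD "" else chrStr (91 - i)
  | none => chrStr (91 - i)

-- list_to_text(items)
def listToText (items : List String) : String :=
  if items.length = 0 then ""
  else if items.length = 1 then items.getD 0 ""
  else if items.length = 2 then items.getD 0 "" ++ " and " ++ items.getD 1 ""
  else PySem.Str.join ", " (PySem.List.slice items none (some (-1))) ++ ", and " ++
    (PySem.List.pyGetD items (-1) "")

-- the premise header text (identical code in both Pythons)
def premiseHeader (n : Int) (letter_map : Option (List (Int × String))) : String :=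
  "Suppose there is a closed system of " ++ PySem.Int.toStr n ++ " variables, " ++
    listToText ((PySem.List.pyRange 1 (n + 1) 1).map (fun i => nodeName i letter_map)) ++
    ", whose causal structure forms a directed acyclic graph and satisfies faithfulness. " ++
    "All the conditional independence relations are: "

def build_premise (ci_relations : List (List Int × List Int)) (n : Int) (letter_map : Option (List (Int × String))) : String :=
  -- pair_to_conds = defaultdict(list); for pair, cond in ci_relations: pair_to_conds[tuple(pair)].append(cond)
  let pair_to_conds : PySem.Dict (List Int) (List (List Int)) :=
    ci_relations.foldl (fun d pc => d.modify pc.1 [] (· ++ [pc.2])) PySem.Dict.empty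
  -- pair_to_conds = {k: sorted(v, key=len) for k, v in pair_to_conds.items()}
  let pair_to_conds2 : PySem.Dict (List Int) (List (List Int)) :=
    pair_to_conds.items.foldl
      (fun d kv => d.insert kv.1 (PySem.List.sorted kv.2 (fun c => c.length) false)) PySem.Dict.empty
  let premise := premiseHeader n letter_map
  -- sorted(pair_to_conds.items()): keys are unique in a dict, so Python's tuple comparison of
  -- (key, value) items never reaches the values — sorting by the key alone is exact.
  let ci_statements : List String :=
    (PySem.List.sorted pair_to_conds2.items (fun kv => kv.1) false).foldl (fun acc kv =>
      let i := PySem.List.pyGetD kv.1 0 0   -- i, j = pair  (Pre_: every pair has length 2)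
      let j := PySem.List.pyGetD kv.1 1 0
      let ni := nodeName i letter_map
      let nj := nodeName j letter_map
      kv.2.foldl (fun acc2 cond =>
        if cond ≠ [] then
          acc2 ++ [ni ++ " indep " ++ nj ++ " | " ++
            PySem.Str.join ", " (cond.map (fun c => nodeName c letter_map))]
        else acc2 ++ [ni ++ " indep " ++ nj]) acc) []
  premise ++ PySem.Str.join "; " ci_statements ++ "."

-- ===== PORT B =====
-- the body of B's single formatting loop
def mkStmt (pair : List Int) (cond : List Int) (letter_map : Option (List (Int × String))) : String :=
  let i := PySem.List.pyGetD pair 0 0   -- i, j = pair  (Pre_: every pair has length 2)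
  let j := PySem.List.pyGetD pair 1 0
  let ni := nodeName i letter_map
  let nj := nodeName j letter_map
  if cond ≠ [] then
    ni ++ " indep " ++ nj ++ " | " ++ PySem.Str.join ", " (cond.map (fun c => nodeName c letter_map))
  else ni ++ " indep " ++ nj

def build_premise_alt (ci_relations : List (List Int × List Int)) (n : Int) (letter_map : Option (List (Int × String))) : String :=
  let premise := premiseHeader n letter_map
  -- for pair, cond in sorted(ci_relations, key=lambda r: (tuple(r[0]), len(r[1]))): append the statement
  let ci_statements : List String :=
    (PySem.List.sorted2 ci_relations (fun r => r.1) (fun r => r.2.length) false).foldl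
      (fun acc r => acc ++ [mkStmt r.1 r.2 letter_map]) []
  premise ++ PySem.Str.join "; " ci_statements ++ "."

-- ===== PRECONDITION & SPEC =====
-- 91 - i is a code point chr accepts AND Lean's Char can carry: Pre_ additionally excludes the
-- ~2048 indices i for which chr(91 - i) is a lone surrogate (A returns a string no Lean String
-- can represent; both Pythons return that same string there).
def ChrOK (i : Int) : Prop := 0 ≤ 91 - i ∧ 91 - i < 1114112 ∧ ¬(55296 ≤ 91 - i ∧ 91 - i < 57344)

-- node_to_name(i, letter_map) returns normally (chr in range / no KeyError);
-- lm.getD [] is [] exactly when letter_map is falsy in Python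
def NameOK (lm : Option (List (Int × String))) (i : Int) : Prop :=
  if (lm.getD []) = [] then ChrOK i else ((lm.getD []).lookup i).isSome = true

-- every pair unpacks as i, j = pair, and every node index named anywhere resolves to a name
def Pre_build_premise (ci_relations : List (List Int × List Int)) (n : Int) (letter_map : Option (List (Int × String))) : Prop :=
  (∀ r ∈ ci_relations, r.1.length = 2 ∧ (∀ i ∈ r.1, NameOK letter_map i) ∧
    (∀ c ∈ r.2, NameOK letter_map c)) ∧
  (∀ i ∈ PySem.List.pyRange 1 (n + 1) 1, NameOK letter_map i)

instance (ci_relations : List (List Int × List Int)) (n : Int) (letter_map : Option (List (Int × String))) : Decidable (Pre_build_premise ci_relations n letter_map) := by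
  unfold Pre_build_premise NameOK ChrOK
  infer_instance

def pvWitness_build_premise : (List (List Int × List Int)) × Int × (Option (List (Int × String))) :=
  ([([1, 2], []), ([1, 2], [3]), ([1, 3], [2])], 3, none)

def Spec_build_premise (ci_relations : List (List Int × List Int)) (n : Int) (letter_map : Option (List (Int × String))) (out : String) : Prop := out = build_premise_alt ci_relations n letter_map
instance (ci_relations : List (List Int × List Int)) (n : Int) (letter_map : Option (List (Int × String))) (out : String) : Decidable (Spec_build_premise ci_relations n letter_map out) := by unfold Spec_build_premise; infer_instance

-- ===== CLAIM (what is proved, stated in full; the proofs are below) =====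
def Claim_equal_build_premise : Prop := ∀ (ci_relations : List (List Int × List Int)) (n : Int) (letter_map : Option (List (Int × String))), Dom_build_premise ci_relations n letter_map → Pre_build_premise ci_relations n letter_map → Spec_build_premise ci_relations n letter_map (build_premise ci_relations n letter_map)

-- ===== LEMMAS AND PROOFS =====

-- abbreviations for the two comparators involved
def lt2 (a b : List Int × List Int) : Bool :=
  decide (a.1 < b.1) || (!decide (b.1 < a.1) && decide (a.2.length < b.2.length))

def ltLen (a b : List Int × List Int) : Bool := decide (a.2.length < b.2.length)

lemma insertBy_of_forall_true {α : Type} (before : α → α → Bool) (x : α) (ys : List α)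
    (h : ∀ y ∈ ys, before x y = true) : PySem.List.insertBy before x ys = x :: ys := by
  cases ys with
  | nil => rfl
  | cons y t => simp [PySem.List.insertBy, h y (by simp)]

lemma insertBy_append_not {α : Type} (before : α → α → Bool) (x : α) (ys zs : List α)
    (h : ∀ y ∈ ys, before x y = false) :
    PySem.List.insertBy before x (ys ++ zs) = ys ++ PySem.List.insertBy before x zs := by
  induction ys with
  | nil => rfl
  | cons y t ih =>
      simp only [List.cons_append, PySem.List.insertBy, h y (by simp)]
      simp only [Bool.false_eq_true, if_false, List.cons.injEq, true_and]
      exact ih (fun y hy => h y (by simp [hy]))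

lemma insertBy_append_all_true {α : Type} (before : α → α → Bool) (x : α) (ys zs : List α)
    (h : ∀ z ∈ zs, before x z = true) :
    PySem.List.insertBy before x (ys ++ zs) = PySem.List.insertBy before x ys ++ zs := by
  induction ys with
  | nil => simp [PySem.List.insertBy, insertBy_of_forall_true before x zs h]
  | cons y t ih =>
      by_cases hb : before x y = true
      · simp [PySem.List.insertBy, hb]
      · simp only [List.cons_append, PySem.List.insertBy, hb]
        simp [ih]

lemma insertBy_congr_mem {α : Type} (before before' : α → α → Bool) (x : α) (ys : List α)
    (h : ∀ y ∈ ys, before x y = before' x y) :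
    PySem.List.insertBy before x ys = PySem.List.insertBy before' x ys := by
  induction ys with
  | nil => rfl
  | cons y t ih =>
      simp only [PySem.List.insertBy, h y (by simp)]
      rw [ih (fun y hy => h y (by simp [hy]))]

lemma insertBy_map {α β : Type} (before : β → β → Bool) (f : α → β) (x : α) (ys : List α) :
    PySem.List.insertBy before (f x) (ys.map f)
      = (PySem.List.insertBy (fun a b => before (f a) (f b)) x ys).map f := by
  induction ys with
  | nil => rfl
  | cons y t ih =>
      by_cases hb : before (f x) (f y) = true
      · simp [PySem.List.insertBy, hb]
      · simp [PySem.List.insertBy, hb, ih]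

-- sorted of a mapped list: sort on the preimages with the composed key
lemma sorted_map {α β κ : Type} [LT κ] [DecidableLT κ] (f : α → β) (xs : List α) (key : β → κ) :
    PySem.List.sorted (xs.map f) key false
      = (PySem.List.sorted xs (fun a => key (f a)) false).map f := by
  rw [PySem.List.sorted_eq_foldl_insertBy, PySem.List.sorted_eq_foldl_insertBy, List.foldl_map]
  suffices h : ∀ acc : List α,
      xs.foldl (fun acc x => PySem.List.insertBy (fun a b => decide (key a < key b)) (f x) acc)
        (acc.map f)
      = (xs.foldl (fun acc x =>
          PySem.List.insertBy (fun a b => decide (key (f a) < key (f b))) x acc) acc).map f by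
    exact h []
  induction xs with
  | nil => intro acc; rfl
  | cons x t ih =>
      intro acc
      simp only [List.foldl_cons]
      rw [insertBy_map (fun a b => decide (key a < key b)) f x acc, ih]

-- I1: inserting a relation with a NEW pair into the flattened grouped list
lemma insert_new_key (ks : List (List Int)) (G : List Int → List (List Int × List Int))
    (p : List Int) (r : List Int × List Int)
    (hs : ks.Pairwise (· < ·)) (hp : p ∉ ks)
    (hG : ∀ k ∈ ks, ∀ x ∈ G k, x.1 = k) (hr : r.1 = p) :
    PySem.List.insertBy lt2 r (ks.flatMap G)
      = (PySem.List.insertBy (fun a b => decide (a < b)) p ks).flatMap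
          (fun k => if k = p then [r] else G k) := by
  induction ks with
  | nil => simp [PySem.List.insertBy]
  | cons k t ih =>
      rcases List.pairwise_cons.mp hs with ⟨hkt, ht⟩
      have hGcongr : t.flatMap (fun k' => if k' = p then [r] else G k') = t.flatMap G :=
        List.flatMap_congr (fun k' hk' => by
          have hne : k' ≠ p := fun h => hp (by simp [h ▸ hk'])
          simp [hne])
      by_cases hpk : p < k
      · have hall : ∀ y ∈ (k :: t).flatMap G, lt2 r y = true := by
          intro y hy
          rcases List.mem_flatMap.mp hy with ⟨k', hk', hyk⟩
          have h1 : y.1 = k' := hG k' hk' y hyk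
          have hlt : p < y.1 := by
            rw [h1]
            rcases List.mem_cons.mp hk' with h | h
            · exact h ▸ hpk
            · exact lt_trans hpk (hkt k' h)
          simp [lt2, hr, hlt]
        have hins : PySem.List.insertBy (fun a b => decide (a < b)) p (k :: t) = p :: k :: t := by
          simp [PySem.List.insertBy, hpk]
        have hkne : k ≠ p := fun h => hp (by simp [h.symm])
        rw [insertBy_of_forall_true lt2 r _ hall, hins]
        simp [hkne, hGcongr]
      · have hne : p ≠ k := by rintro rfl; exact hp (by simp)
        have hkp : k < p := by
          rcases lt_trichotomy p k with h | h | h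
          · exact absurd h hpk
          · exact absurd h hne
          · exact h
        have hGk : ∀ y ∈ G k, lt2 r y = false := by
          intro y hy
          have h1 : y.1 = k := hG k (by simp) y hy
          have h2 : ¬ (r.1 < y.1) := by rw [hr, h1]; exact fun h => absurd h (not_lt_of_gt hkp)
          have h3 : y.1 < r.1 := by rw [hr, h1]; exact hkp
          simp [lt2, h2, h3]
        have hins : PySem.List.insertBy (fun a b => decide (a < b)) p (k :: t)
            = k :: PySem.List.insertBy (fun a b => decide (a < b)) p t := by
          simp [PySem.List.insertBy, hpk]
        rw [hins]
        simp only [List.flatMap_cons]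
        rw [insertBy_append_not lt2 r _ _ hGk,
          ih ht (fun h => hp (by simp [h])) (fun k' hk' => hG k' (by simp [hk'])), if_neg (Ne.symm hne)]

-- I2: inserting a relation with an EXISTING pair into the flattened grouped list
lemma insert_old_key (ks : List (List Int)) (G : List Int → List (List Int × List Int))
    (p : List Int) (r : List Int × List Int)
    (hs : ks.Pairwise (· < ·)) (hp : p ∈ ks)
    (hG : ∀ k ∈ ks, ∀ x ∈ G k, x.1 = k) (hr : r.1 = p) :
    PySem.List.insertBy lt2 r (ks.flatMap G)
      = ks.flatMap (fun k => if k = p then PySem.List.insertBy ltLen r (G k) else G k) := by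
  induction ks with
  | nil => cases hp
  | cons k t ih =>
      rcases List.pairwise_cons.mp hs with ⟨hkt, ht⟩
      by_cases hpk : k = p
      · subst hpk
        have hrest : ∀ y ∈ t.flatMap G, lt2 r y = true := by
          intro y hy
          rcases List.mem_flatMap.mp hy with ⟨k', hk', hyk⟩
          have h1 : y.1 = k' := hG k' (by simp [hk']) y hyk
          have hlt : r.1 < y.1 := by rw [hr, h1]; exact hkt k' hk'
          simp [lt2, hlt]
        have hcongr : PySem.List.insertBy lt2 r (G k) = PySem.List.insertBy ltLen r (G k) := by
          apply insertBy_congr_mem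
          intro y hy
          have h1 : y.1 = k := hG k (by simp) y hy
          simp [lt2, ltLen, hr, h1]
        have hGcongr : t.flatMap (fun k' => if k' = k then PySem.List.insertBy ltLen r (G k') else G k')
            = t.flatMap G :=
          List.flatMap_congr (fun k' hk' => by
            have hne : k' ≠ k := fun h => absurd (hkt k' hk') (by rw [h]; exact lt_irrefl _)
            simp [hne])
        simp only [List.flatMap_cons]
        rw [insertBy_append_all_true lt2 r _ _ hrest, hcongr]
        simp [hGcongr]
      · have hpt : p ∈ t := by
          rcases List.mem_cons.mp hp with h | h
          · exact absurd h.symm hpk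
          · exact h
        have hkp : k < p := hkt p hpt
        have hGk : ∀ y ∈ G k, lt2 r y = false := by
          intro y hy
          have h1 : y.1 = k := hG k (by simp) y hy
          have h2 : ¬ (r.1 < y.1) := by rw [hr, h1]; exact fun h => absurd h (not_lt_of_gt hkp)
          have h3 : y.1 < r.1 := by rw [hr, h1]; exact hkp
          simp [lt2, h2, h3]
        simp only [List.flatMap_cons]
        rw [insertBy_append_not lt2 r _ _ hGk,
          ih ht hpt (fun k' hk' => hG k' (by simp [hk'])), if_neg hpk]

-- the default decidability instance on List Int coincides with the LinearOrder one
-- (needed to apply the PySem ORDER lemmas to the ports' sorted calls)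
lemma decLT_eq : (fun a b => a.decidableLT b : DecidableLT (List Int))
    = (LinearOrder.toDecidableLT : DecidableLT (List Int)) := Subsingleton.elim _ _

-- sorted(set(xs)) over pairs is strictly increasing (instance-adjusted sorted_ofList_pairwise_lt)
lemma sorted_keys_pairwise (xs : List (List Int)) :
    (PySem.List.sorted (PySem.Set.ofList xs) (fun k => k) false).Pairwise (· < ·) := by
  rw [decLT_eq]
  exact PySem.List.sorted_ofList_pairwise_lt xs

-- group of a pair inside the flat list
def groupOf (l : List (List Int × List Int)) (k : List Int) : List (List Int × List Int) :=
  PySem.List.sorted (l.filter (fun r => r.1 == k)) (fun r => r.2.length) false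

-- H: one stable flat sort by (pair, len cond) = sorted distinct pairs, each group sorted by len
lemma flat_sort_eq_grouped (l : List (List Int × List Int)) :
    PySem.List.sorted2 l (fun r => r.1) (fun r => r.2.length) false
      = (PySem.List.sorted (PySem.Set.ofList (l.map (·.1))) (fun k => k) false).flatMap
          (groupOf l) := by
  induction l using List.reverseRecOn with
  | nil => rfl
  | append_singleton l r ih =>
      have hfoldl : ∀ (m : List (List Int × List Int)),
          PySem.List.sorted2 m (fun r => r.1) (fun r => r.2.length) false
            = m.foldl (fun acc x => PySem.List.insertBy lt2 x acc) [] := by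
        intro m; rfl
      rw [hfoldl, List.foldl_append, ← hfoldl, ih]
      simp only [List.foldl_cons, List.foldl_nil]
      have hkeys : (l ++ [r]).map (·.1) = l.map (·.1) ++ [r.1] := by simp
      have hsortK : ∀ xs : List (List Int),
          PySem.List.sorted xs (fun k => k) false
            = xs.foldl (fun acc x => PySem.List.insertBy (fun a b => decide (a < b)) x acc) [] :=
        fun xs => PySem.List.sorted_eq_foldl_insertBy xs _
      have hpair : (PySem.List.sorted (PySem.Set.ofList (l.map (·.1))) (fun k => k) false).Pairwise
          (· < ·) := sorted_keys_pairwise _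
      have hmemK : ∀ k, k ∈ PySem.List.sorted (PySem.Set.ofList (l.map (·.1))) (fun k => k) false
          ↔ k ∈ l.map (·.1) := by
        intro k
        rw [PySem.List.mem_sorted, PySem.Set.mem_ofList]
      have hGmem : ∀ k, ∀ x ∈ groupOf l k, x.1 = k := by
        intro k x hx
        have h1 := (PySem.List.mem_sorted _ _ _ _).mp hx
        have h2 := List.mem_filter.mp h1
        exact by simpa using h2.2
      by_cases hmem : r.1 ∈ l.map (·.1)
      · -- existing pair: the key list is unchanged, r joins its group
        have hset : PySem.Set.ofList ((l ++ [r]).map (·.1)) = PySem.Set.ofList (l.map (·.1)) := by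
          rw [hkeys, PySem.Set.ofList_append_singleton,
            PySem.Set.add_of_mem (by rw [PySem.Set.mem_ofList]; exact hmem)]
        rw [hset]
        rw [insert_old_key _ (groupOf l) r.1 r hpair ((hmemK r.1).mpr hmem)
          (fun k _ => hGmem k) rfl]
        apply List.flatMap_congr
        intro k hk
        by_cases hkp : k = r.1
        · simp only [if_pos hkp]
          unfold groupOf
          rw [List.filter_append]
          have hfr : List.filter (fun x => x.1 == k) [r] = [r] := by simp [hkp]
          rw [hfr,
            PySem.List.sorted_eq_foldl_insertBy (List.filter (fun r => r.1 == k) l ++ [r])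
              (fun r => r.2.length),
            List.foldl_append, ← PySem.List.sorted_eq_foldl_insertBy]
          rfl
        · simp only [if_neg hkp]
          unfold groupOf
          rw [List.filter_append]
          have : List.filter (fun x => x.1 == k) [r] = [] := by
            simp [Ne.symm hkp]
          simp [this]
      · -- new pair: its key is inserted, its group is just [r]
        have hset : PySem.Set.ofList ((l ++ [r]).map (·.1))
            = PySem.Set.ofList (l.map (·.1)) ++ [r.1] := by
          rw [hkeys, PySem.Set.ofList_append_singleton,
            PySem.Set.add_of_not_mem (by rw [PySem.Set.mem_ofList]; exact hmem)]
        rw [hset]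
        rw [insert_new_key _ (groupOf l) r.1 r hpair
          (fun h => hmem ((hmemK r.1).mp h)) (fun k _ => hGmem k) rfl]
        rw [hsortK (PySem.Set.ofList (l.map (·.1)) ++ [r.1]), List.foldl_append,
          ← hsortK]
        simp only [List.foldl_cons, List.foldl_nil]
        apply List.flatMap_congr
        intro k hk
        by_cases hkp : k = r.1
        · simp only [if_pos hkp]
          unfold groupOf
          rw [List.filter_append]
          have h0 : List.filter (fun x => x.1 == k) l = [] := by
            rw [List.filter_eq_nil_iff]
            intro a ha hbeq
            refine hmem ?_
            rw [← hkp]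
            exact List.mem_map.mpr ⟨a, ha, by simpa using hbeq⟩
          have h1 : List.filter (fun x => x.1 == k) [r] = [r] := by simp [hkp]
          rw [h0, h1]
          rfl
        · simp only [if_neg hkp]
          unfold groupOf
          rw [List.filter_append]
          have : List.filter (fun x => x.1 == k) [r] = [] := by simp [Ne.symm hkp]
          simp [this]

-- the statement lists of the two ports coincide
lemma statements_eq (l : List (List Int × List Int)) (lm : Option (List (Int × String))) :
    (PySem.List.sorted
        (((l.foldl (fun d pc => d.modify pc.1 [] (· ++ [pc.2]))
              (PySem.Dict.empty : PySem.Dict (List Int) (List (List Int)))).items.foldl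
            (fun d kv => d.insert kv.1 (PySem.List.sorted kv.2 (fun c => c.length) false))
            (PySem.Dict.empty : PySem.Dict (List Int) (List (List Int)))).items)
        (fun kv => kv.1) false).foldl
      (fun acc kv =>
        kv.2.foldl (fun acc2 cond =>
          if cond ≠ [] then
            acc2 ++ [nodeName (PySem.List.pyGetD kv.1 0 0) lm ++ " indep " ++
              nodeName (PySem.List.pyGetD kv.1 1 0) lm ++ " | " ++
              PySem.Str.join ", " (cond.map (fun c => nodeName c lm))]
          else acc2 ++ [nodeName (PySem.List.pyGetD kv.1 0 0) lm ++ " indep " ++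
            nodeName (PySem.List.pyGetD kv.1 1 0) lm]) acc) []
    = (PySem.List.sorted2 l (fun r => r.1) (fun r => r.2.length) false).foldl
        (fun acc r => acc ++ [mkStmt r.1 r.2 lm]) [] := by
  -- names for the two dicts
  set d1 := l.foldl (fun d pc => d.modify pc.1 [] (· ++ [pc.2]))
      (PySem.Dict.empty : PySem.Dict (List Int) (List (List Int))) with hd1
  set d2 := d1.items.foldl
      (fun d kv => d.insert kv.1 (PySem.List.sorted kv.2 (fun c => c.length) false))
      (PySem.Dict.empty : PySem.Dict (List Int) (List (List Int))) with hd2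
  -- both loops are maps
  have hinner : ∀ (acc : List String) (kv : List Int × List (List Int)),
      kv.2.foldl (fun acc2 cond =>
          if cond ≠ [] then
            acc2 ++ [nodeName (PySem.List.pyGetD kv.1 0 0) lm ++ " indep " ++
              nodeName (PySem.List.pyGetD kv.1 1 0) lm ++ " | " ++
              PySem.Str.join ", " (cond.map (fun c => nodeName c lm))]
          else acc2 ++ [nodeName (PySem.List.pyGetD kv.1 0 0) lm ++ " indep " ++
            nodeName (PySem.List.pyGetD kv.1 1 0) lm]) acc
        = acc ++ kv.2.map (fun cond => mkStmt kv.1 cond lm) := by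
    intro acc kv
    have hsplit : (fun (acc2 : List String) (cond : List Int) =>
        if cond ≠ [] then
          acc2 ++ [nodeName (PySem.List.pyGetD kv.1 0 0) lm ++ " indep " ++
            nodeName (PySem.List.pyGetD kv.1 1 0) lm ++ " | " ++
            PySem.Str.join ", " (cond.map (fun c => nodeName c lm))]
        else acc2 ++ [nodeName (PySem.List.pyGetD kv.1 0 0) lm ++ " indep " ++
          nodeName (PySem.List.pyGetD kv.1 1 0) lm])
        = fun acc2 cond => acc2 ++ [mkStmt kv.1 cond lm] := by
      funext acc2 cond
      by_cases hc : cond ≠ [] <;> simp [mkStmt, hc]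
    rw [hsplit, PySem.List.foldl_append_singleton_eq_map]
  have houter : (PySem.List.sorted d2.items (fun kv => kv.1) false).foldl
      (fun acc kv =>
        kv.2.foldl (fun acc2 cond =>
          if cond ≠ [] then
            acc2 ++ [nodeName (PySem.List.pyGetD kv.1 0 0) lm ++ " indep " ++
              nodeName (PySem.List.pyGetD kv.1 1 0) lm ++ " | " ++
              PySem.Str.join ", " (cond.map (fun c => nodeName c lm))]
          else acc2 ++ [nodeName (PySem.List.pyGetD kv.1 0 0) lm ++ " indep " ++
            nodeName (PySem.List.pyGetD kv.1 1 0) lm]) acc) []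
      = (PySem.List.sorted d2.items (fun kv => kv.1) false).flatMap
          (fun kv => kv.2.map (fun cond => mkStmt kv.1 cond lm)) := by
    rw [PySem.List.foldl_congr_mem (PySem.List.sorted d2.items (fun kv => kv.1) false) _
      (fun acc kv => acc ++ kv.2.map (fun cond => mkStmt kv.1 cond lm)) []
      (fun acc kv _ => hinner acc kv)]
    rw [PySem.List.foldl_append_eq_flatMap]
    rfl
  rw [houter]
  -- characterize the dict pipeline
  have hnd1 : d1.keys.Nodup := by
    rw [hd1]
    exact PySem.Dict.nodup_keys_foldl_modify_key l (fun pc => pc.1) [] (fun d pc => (· ++ [pc.2]))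
      PySem.Dict.empty (by simp [PySem.Dict.keys_empty])
  have hitems1 : d1.items = d1.keys.map (fun k => (k, d1.getD k [])) :=
    PySem.Dict.items_eq_map_keys d1 hnd1 []
  have hkeys1 : d1.keys = PySem.Set.ofList (l.map (fun pc => pc.1)) := by
    rw [hd1]
    rw [PySem.Dict.keys_foldl_modify_key l (fun pc => pc.1) [] (fun d pc => (· ++ [pc.2]))
      PySem.Dict.empty]
    simp [PySem.Dict.keys_empty, PySem.Set.update_nil_left]
  have hgetD1 : ∀ k, d1.getD k [] = (l.filter (fun pc => pc.1 == k)).map (fun pc => pc.2) := by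
    intro k
    rw [hd1, PySem.Dict.getD_foldl_modify_append]
    simp [PySem.Dict.getD_empty]
  have hitems2 : d2.items = d1.items.map
      (fun kv => (kv.1, PySem.List.sorted kv.2 (fun c => c.length) false)) := by
    rw [hd2]
    have h := PySem.Dict.items_foldl_insert_fresh (l := d1.items)
      (d := (PySem.Dict.empty : PySem.Dict (List Int) (List (List Int))))
      (k := fun kv => kv.1)
      (v := fun kv => PySem.List.sorted kv.2 (fun c => c.length) false)
      (fun a _ => PySem.Dict.contains_empty _) (by exact hnd1)
    simpa using h
  have hitems2' : d2.items = d1.keys.map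
      (fun k => (k, PySem.List.sorted (d1.getD k []) (fun c => c.length) false)) := by
    rw [hitems2, hitems1, List.map_map]
    rfl
  -- sort of the grouped items is the sort of the keys, mapped
  have hsorted2 : PySem.List.sorted d2.items (fun kv => kv.1) false
      = (PySem.List.sorted d1.keys (fun k => k) false).map
          (fun k => (k, PySem.List.sorted (d1.getD k []) (fun c => c.length) false)) := by
    rw [hitems2']
    exact sorted_map (fun k => (k, PySem.List.sorted (d1.getD k []) (fun c => c.length) false))
      d1.keys (fun kv => kv.1)
  rw [hsorted2, List.flatMap_map]
  -- B's side: the flat sort, regrouped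
  rw [flat_sort_eq_grouped l]
  have hBmap : ∀ (ks : List (List Int)),
      (ks.flatMap (groupOf l)).foldl (fun acc r => acc ++ [mkStmt r.1 r.2 lm]) []
        = ks.flatMap (fun k => (groupOf l k).map (fun r => mkStmt r.1 r.2 lm)) := by
    intro ks
    rw [PySem.List.foldl_append_singleton_eq_map, List.map_flatMap]
    rfl
  rw [hBmap, hkeys1]
  -- groupwise agreement
  apply List.flatMap_congr
  intro k hk
  have hgrp : (groupOf l k).map (fun r => mkStmt r.1 r.2 lm)
      = (groupOf l k).map (fun r => mkStmt k r.2 lm) := by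
    apply List.map_congr_left
    intro r hr
    have h1 := (PySem.List.mem_sorted _ _ _ _).mp hr
    have h2 : r.1 = k := by simpa using (List.mem_filter.mp h1).2
    rw [h2]
  rw [hgrp]
  have hsnd : PySem.List.sorted (d1.getD k []) (fun c => c.length) false
      = (groupOf l k).map (fun r => r.2) := by
    rw [hgetD1 k]
    exact sorted_map (fun pc => pc.2) (l.filter (fun pc => pc.1 == k)) (fun c => c.length)
  rw [hsnd, List.map_map]
  rfl

-- ===== VERDICT (by name: the statement is the Claim_ definition above) =====
theorem build_premise_spec : Claim_equal_build_premise := by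
  intro ci_relations n letter_map _ _
  unfold Spec_build_premise
  show build_premise ci_relations n letter_map = build_premise_alt ci_relations n letter_map
  simp only [build_premise, build_premise_alt]
  rw [statements_eq ci_relations letter_map]
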